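-- pv_equiv track=rewrite | github.com/Jonah-Wilbur/Bioinformatics-puzzles | Consensus string.py | concensus_element
-- ===== SOURCE A (Python) =====
-- def concensus_element(strand):
--     A=[]
--     C=[]
--     G=[]
--     T=[]
--     for i in range(len(strand)):
--         if strand[i]=='A':
--             A.append(1)
--             C.append(0)
--             G.append(0)
--             T.append(0)
--         if strand[i]=='C':
--             A.append(0)
--             C.append(1)
--             G.append(0)
--             T.append(0)
--         if strand[i]=='T':
--             A.append(0)
--             C.append(0)
--             G.append(0)
--             T.append(1)
--         if strand[i]=='G':
--             A.append(0)
--             C.append(0)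
--             G.append(1)
--             T.append(0)
--         #A.append(' ')
--         #C.append(' ')
--         #G.append(' ')
--         #T.append(' ')
--     return [A, C, T, G]
-- ===== SOURCE B (Python) =====
-- def concensus_element(strand):
--     # Four independent passes, one per base: indicator over the filtered strand.
--     def indicator(base):
--         return [1 if ch == base else 0 for ch in strand if ch in 'ACGT']
--     return [indicator('A'), indicator('C'), indicator('T'), indicator('G')]
-- ===== Notes on version B (the rewrite author's own statement) =====
-- stated objective: simpler
-- what changed: Replaced the single simultaneous loop appending to four accumulator lists with four independent passes, each a filtered one-per-base indicator comprehension.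
import Mathlib
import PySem

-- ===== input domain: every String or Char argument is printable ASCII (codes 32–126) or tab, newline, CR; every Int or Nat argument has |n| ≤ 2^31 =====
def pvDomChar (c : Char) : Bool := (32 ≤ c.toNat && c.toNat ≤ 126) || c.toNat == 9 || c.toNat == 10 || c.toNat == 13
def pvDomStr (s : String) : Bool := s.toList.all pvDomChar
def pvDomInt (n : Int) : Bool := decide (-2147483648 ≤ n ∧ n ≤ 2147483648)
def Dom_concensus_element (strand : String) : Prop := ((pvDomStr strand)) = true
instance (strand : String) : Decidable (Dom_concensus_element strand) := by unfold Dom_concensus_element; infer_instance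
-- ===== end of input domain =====

-- B replaces A's single loop building four lists at once with four independent
-- per-base indicator passes over the filtered strand (objective: simpler).

-- ===== PORT A =====
-- one loop over the characters; four sequential ifs appending to the four accumulators
def concensus_element (strand : String) : List (List Int) :=
  let st := strand.toList.foldl
    (fun (s : List Int × List Int × List Int × List Int) ch =>
      let s := if ch = 'A' then (s.1 ++ [1], s.2.1 ++ [0], s.2.2.1 ++ [0], s.2.2.2 ++ [0]) else s
      let s := if ch = 'C' then (s.1 ++ [0], s.2.1 ++ [1], s.2.2.1 ++ [0], s.2.2.2 ++ [0]) else s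
      let s := if ch = 'T' then (s.1 ++ [0], s.2.1 ++ [0], s.2.2.1 ++ [0], s.2.2.2 ++ [1]) else s
      let s := if ch = 'G' then (s.1 ++ [0], s.2.1 ++ [0], s.2.2.1 ++ [1], s.2.2.2 ++ [0]) else s
      s)
    ([], [], [], [])
  [st.1, st.2.1, st.2.2.2, st.2.2.1]

-- ===== PORT B =====
def pvIndicator (base : Char) (strand : String) : List Int :=
  (strand.toList.filter (fun ch => ch ∈ ['A', 'C', 'G', 'T'])).map
    (fun ch => if ch = base then (1 : Int) else 0)

def concensus_element_alt (strand : String) : List (List Int) :=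
  [pvIndicator 'A' strand, pvIndicator 'C' strand, pvIndicator 'T' strand, pvIndicator 'G' strand]

-- ===== PRECONDITION & SPEC =====
def Spec_concensus_element (strand : String) (out : List (List Int)) : Prop := out = concensus_element_alt strand
instance (strand : String) (out : List (List Int)) : Decidable (Spec_concensus_element strand out) := by unfold Spec_concensus_element; infer_instance

-- ===== CLAIM (what is proved, stated in full; the proofs are below) =====
def Claim_equal_concensus_element : Prop := ∀ (strand : String), Dom_concensus_element strand → Spec_concensus_element strand (concensus_element strand)

-- ===== LEMMAS AND PROOFS =====

def pvStep (s : List Int × List Int × List Int × List Int) (ch : Char) :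
    List Int × List Int × List Int × List Int :=
  let s := if ch = 'A' then (s.1 ++ [1], s.2.1 ++ [0], s.2.2.1 ++ [0], s.2.2.2 ++ [0]) else s
  let s := if ch = 'C' then (s.1 ++ [0], s.2.1 ++ [1], s.2.2.1 ++ [0], s.2.2.2 ++ [0]) else s
  let s := if ch = 'T' then (s.1 ++ [0], s.2.1 ++ [0], s.2.2.1 ++ [0], s.2.2.2 ++ [1]) else s
  let s := if ch = 'G' then (s.1 ++ [0], s.2.1 ++ [0], s.2.2.1 ++ [1], s.2.2.2 ++ [0]) else s
  s

def pvInd (base : Char) (l : List Char) : List Int :=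
  (l.filter (fun ch => ch ∈ ['A', 'C', 'G', 'T'])).map (fun ch => if ch = base then (1 : Int) else 0)

theorem pvFoldInv (l : List Char) (a c g t : List Int) :
    l.foldl pvStep (a, c, g, t) =
      (a ++ pvInd 'A' l, c ++ pvInd 'C' l, g ++ pvInd 'G' l, t ++ pvInd 'T' l) := by
  induction l generalizing a c g t with
  | nil => simp [pvInd]
  | cons ch l ih =>
    by_cases hA : ch = 'A'
    · simp [pvStep, pvInd, hA, ih, List.append_assoc]
    · by_cases hC : ch = 'C'
      · simp [pvStep, pvInd, hA, hC, ih, List.append_assoc]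
      · by_cases hT : ch = 'T'
        · simp [pvStep, pvInd, hC, hT, ih, List.append_assoc]
        · by_cases hG : ch = 'G'
          · simp [pvStep, pvInd, hT, hG, ih, List.append_assoc]
          · simp [pvStep, pvInd, hA, hC, hT, hG, ih]

-- ===== VERDICT (by name: the statement is the Claim_ definition above) =====
theorem concensus_element_spec : Claim_equal_concensus_element := by
  intro strand _
  show concensus_element strand = concensus_element_alt strand
  have h : concensus_element strand =
      [(strand.toList.foldl pvStep ([], [], [], [])).1,
       (strand.toList.foldl pvStep ([], [], [], [])).2.1,
       (strand.toList.foldl pvStep ([], [], [], [])).2.2.2,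
       (strand.toList.foldl pvStep ([], [], [], [])).2.2.1] := rfl
  rw [h, pvFoldInv]
  rfl
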